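-- pv_equiv track=rewrite | github.com/CAIOZANETTI/gps_maquina | pages/03_tranformar.py | check_motor_ligado
-- ===== SOURCE A (Python) =====
-- def check_motor_ligado(atividades:list)->list:
-- 	status =[]
-- 	ligado=0
-- 	for atividade in atividades:
-- 		if atividade=='chave_ligada':
-- 			ligado = 1
-- 		elif atividade=='chave_desligada':
-- 			ligado =0
-- 		status.append(ligado)
-- 	return status
-- ===== SOURCE B (Python) =====
-- def check_motor_ligado(atividades: list) -> list:
--     # segment-based fill: on each control token, flush the previous segment
--     # as a block of the old value, then switch; flush the tail at the end
--     out = []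
--     val = 0
--     seg = 0
--     for i, a in enumerate(atividades):
--         if a == 'chave_ligada' or a == 'chave_desligada':
--             out += [val] * (i - seg)
--             val = 1 if a == 'chave_ligada' else 0
--             seg = i
--     out += [val] * (len(atividades) - seg)
--     return out
-- ===== Notes on version B (the rewrite author's own statement) =====
-- stated objective: alternative
-- what changed: Replaces the per-element stateful append loop by a segment-based fill: scan only for control tokens with their indices and emit each constant-valued segment as one replicated block.
import Mathlib
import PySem

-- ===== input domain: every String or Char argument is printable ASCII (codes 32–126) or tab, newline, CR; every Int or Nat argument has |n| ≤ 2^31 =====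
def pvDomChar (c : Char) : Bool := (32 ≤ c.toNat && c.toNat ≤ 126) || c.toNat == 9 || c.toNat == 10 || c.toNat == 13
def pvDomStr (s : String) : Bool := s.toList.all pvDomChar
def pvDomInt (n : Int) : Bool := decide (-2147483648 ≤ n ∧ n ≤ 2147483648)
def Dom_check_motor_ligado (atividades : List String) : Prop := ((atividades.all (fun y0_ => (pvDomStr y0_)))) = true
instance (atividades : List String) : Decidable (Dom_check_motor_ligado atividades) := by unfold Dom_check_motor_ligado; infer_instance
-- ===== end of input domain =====

-- B replaces A's per-element stateful append loop by a segment-based fill (scan control tokens, emit replicated blocks); same cost, alternative structure.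


-- ===== PORT A =====
-- A: one loop carrying (status, ligado); each step updates ligado and appends it.
def check_motor_ligado (atividades : List String) : List Int :=
  (atividades.foldl
    (fun (s : List Int × Int) atividade =>
      let ligado :=
        if atividade = "chave_ligada" then (1 : Int)
        else if atividade = "chave_desligada" then (0 : Int)
        else s.2
      (s.1 ++ [ligado], ligado))
    ([], 0)).1

-- ===== PORT B =====
-- loop body of Source B: state (out, val, seg); control token flushes [val]*(i-seg) and switches
def pvSegStep (s : List Int × Int × Int) (p : Int × String) : List Int × Int × Int :=
  if p.2 = "chave_ligada" ∨ p.2 = "chave_desligada" then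
    (s.1 ++ PySem.List.pyRepeat [s.2.1] (p.1 - s.2.2),
     (if p.2 = "chave_ligada" then (1 : Int) else 0), p.1)
  else s

def check_motor_ligado_alt (atividades : List String) : List Int :=
  let r := (PySem.List.enumerate atividades).foldl pvSegStep ([], 0, 0)
  r.1 ++ PySem.List.pyRepeat [r.2.1] ((atividades.length : Int) - r.2.2)

-- ===== PRECONDITION & SPEC =====
def Spec_check_motor_ligado (atividades : List String) (out : List Int) : Prop := out = check_motor_ligado_alt atividades
instance (atividades : List String) (out : List Int) : Decidable (Spec_check_motor_ligado atividades out) := by unfold Spec_check_motor_ligado; infer_instance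

-- ===== CLAIM (what is proved, stated in full; the proofs are below) =====
def Claim_equal_check_motor_ligado : Prop := ∀ (atividades : List String), Dom_check_motor_ligado atividades → Spec_check_motor_ligado atividades (check_motor_ligado atividades)

-- ===== LEMMAS AND PROOFS =====
-- A's running-state stream, as a pure recursion (reference form of A's result).
def pvFfA (prev : Int) : List String → List Int
  | [] => []
  | a :: rest =>
    let cur := if a = "chave_ligada" then (1 : Int)
      else if a = "chave_desligada" then (0 : Int) else prev
    cur :: pvFfA cur rest

theorem pv_fold_eq_ffA (l : List String) (acc : List Int) (prev : Int) :
    (l.foldl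
      (fun (s : List Int × Int) atividade =>
        let ligado :=
          if atividade = "chave_ligada" then (1 : Int)
          else if atividade = "chave_desligada" then (0 : Int)
          else s.2
        (s.1 ++ [ligado], ligado))
      (acc, prev)).1 = acc ++ pvFfA prev l := by
  induction l generalizing acc prev with
  | nil => simp [pvFfA]
  | cons a rest ih =>
    simp only [List.foldl_cons, pvFfA]
    by_cases h1 : a = "chave_ligada"
    · simp [h1, ih]
    · by_cases h2 : a = "chave_desligada"
      · simp [h2, ih]
      · simp [h1, h2, ih]

theorem pv_pyRepeat_succ (v : Int) (m : Int) (h : 0 ≤ m) :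
    PySem.List.pyRepeat [v] (m + 1) = PySem.List.pyRepeat [v] m ++ [v] := by
  simp only [PySem.List.pyRepeat_singleton]
  have : (m + 1).toNat = m.toNat + 1 := by omega
  rw [this, List.replicate_succ']

-- Loop invariant for B's segment fold: finishing the fold from (out, val, seg) over
-- the elements indexed from k and flushing the tail equals out ++ pending segment ++ A's stream.
theorem pv_seg_loop (l : List String) (k : Int) (out : List Int) (val seg : Int) (h : seg ≤ k) :
    ((PySem.List.enumerate l k).foldl pvSegStep (out, val, seg)).1
      ++ PySem.List.pyRepeat
          [((PySem.List.enumerate l k).foldl pvSegStep (out, val, seg)).2.1]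
          (k + l.length - ((PySem.List.enumerate l k).foldl pvSegStep (out, val, seg)).2.2)
    = out ++ PySem.List.pyRepeat [val] (k - seg) ++ pvFfA val l := by
  induction l generalizing k out val seg with
  | nil => simp [PySem.List.enumerate, pvFfA]
  | cons a rest ih =>
    rw [PySem.List.enumerate_cons]
    simp only [List.foldl_cons, pvFfA, List.length_cons]
    by_cases hc : a = "chave_ligada" ∨ a = "chave_desligada"
    · have hstep : pvSegStep (out, val, seg) (k, a) =
        (out ++ PySem.List.pyRepeat [val] (k - seg),
         (if a = "chave_ligada" then (1 : Int) else 0), k) := by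
        simp [pvSegStep, hc]
      rw [hstep]
      push_cast
      have harith : k + ((rest.length : Int) + 1) = (k + 1) + rest.length := by ring
      rw [harith]
      rw [ih (k + 1) _ _ k (by omega)]
      have h1 : k + 1 - k = (1 : Int) := by ring
      have hone : PySem.List.pyRepeat [(if a = "chave_ligada" then (1 : Int) else 0)] (1 : Int)
          = [(if a = "chave_ligada" then (1 : Int) else 0)] := by
        simp [PySem.List.pyRepeat_singleton]
      rw [h1, hone]
      rcases hc with hc | hc <;> simp [hc]
    · have hstep : pvSegStep (out, val, seg) (k, a) = (out, val, seg) := by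
        simp [pvSegStep, hc]
      rw [hstep]
      push_cast
      have harith : k + ((rest.length : Int) + 1) = (k + 1) + rest.length := by ring
      rw [harith]
      rw [ih (k + 1) out val seg (by omega)]
      have h1 : a ≠ "chave_ligada" := fun h' => hc (Or.inl h')
      have h2 : a ≠ "chave_desligada" := fun h' => hc (Or.inr h')
      have harith2 : k + 1 - seg = (k - seg) + 1 := by ring
      rw [harith2, pv_pyRepeat_succ val (k - seg) (by omega)]
      simp [h1, h2]

-- ===== VERDICT (by name: the statement is the Claim_ definition above) =====
theorem check_motor_ligado_spec : Claim_equal_check_motor_ligado := by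
  intro atividades _
  unfold Spec_check_motor_ligado check_motor_ligado check_motor_ligado_alt
  rw [pv_fold_eq_ffA atividades [] 0]
  have := pv_seg_loop atividades 0 [] 0 0 (le_refl 0)
  simp only [zero_add] at this
  rw [this]
  simp [PySem.List.pyRepeat_singleton]
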